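-- pv_equiv track=rewrite | github.com/davidebolo1993/TRiCoLOR | TRiCoLOR/VCFwriter.py | Modifier
-- ===== SOURCE A (Python) =====
-- def modifier(coordinates): #fast way to remove None and substitute with closest number in list
--
--
-- 	coordinates=[el+1 if el is not None else el for el in coordinates] #get true coordinates
-- 	start = next(ele for ele in coordinates if ele is not None)
--
-- 	for ind, ele in enumerate(coordinates):
--
-- 		if ele is None:
--
-- 			coordinates[ind] = start
--
-- 		else:
--
-- 			start = ele
--
-- 	return coordinates
--
-- def Modifier(list_of_coord,seq):
--
--
-- 	coords_without_insertions=modifier(list_of_coord)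
--
-- 	#Modify deletions
--
-- 	NewSeq=''
-- 	coords_purified=[]
--
-- 	for i in range(len(coords_without_insertions)-1):
--
-- 		if coords_without_insertions[i+1]-coords_without_insertions[i] > 1:
--
-- 			coords_purified.append(coords_without_insertions[i])
-- 			coords_purified.extend(list(range(coords_without_insertions[i]+1,coords_without_insertions[i+1])))
-- 			NewSeq+=seq[i]
-- 			NewSeq+="-"*(coords_without_insertions[i+1]-coords_without_insertions[i]-1)
--
-- 		else:
--
-- 			coords_purified.append(coords_without_insertions[i])
-- 			NewSeq+=seq[i]
--
-- 	return coords_purified,NewSeq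
-- ===== SOURCE B (Python) =====
-- def Modifier(list_of_coord, seq):
--     # One fused pass: forward-fill coordinates on the fly (prev) instead of
--     # building the filled array first; collect sequence pieces and join once.
--     prev = next(el for el in list_of_coord if el is not None) + 1
--     coords = []
--     pieces = []
--     for i in range(len(list_of_coord) - 1):
--         nro = list_of_coord[i + 1]
--         nxt = prev if nro is None else nro + 1
--         if nxt - prev > 1:
--             coords.append(prev)
--             coords.extend(range(prev + 1, nxt))
--             pieces.append(seq[i] + "-" * (nxt - prev - 1))
--         else:
--             coords.append(prev)
--             pieces.append(seq[i])
--         prev = nxt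
--     return coords, "".join(pieces)
-- ===== Notes on version B (the rewrite author's own statement) =====
-- stated objective: simpler
-- what changed: Fused A's two passes (build the full forward-filled coordinate array, then scan consecutive pairs) into one loop that carries only the current filled coordinate prev, collecting sequence pieces and joining once at the end.
import Mathlib
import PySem

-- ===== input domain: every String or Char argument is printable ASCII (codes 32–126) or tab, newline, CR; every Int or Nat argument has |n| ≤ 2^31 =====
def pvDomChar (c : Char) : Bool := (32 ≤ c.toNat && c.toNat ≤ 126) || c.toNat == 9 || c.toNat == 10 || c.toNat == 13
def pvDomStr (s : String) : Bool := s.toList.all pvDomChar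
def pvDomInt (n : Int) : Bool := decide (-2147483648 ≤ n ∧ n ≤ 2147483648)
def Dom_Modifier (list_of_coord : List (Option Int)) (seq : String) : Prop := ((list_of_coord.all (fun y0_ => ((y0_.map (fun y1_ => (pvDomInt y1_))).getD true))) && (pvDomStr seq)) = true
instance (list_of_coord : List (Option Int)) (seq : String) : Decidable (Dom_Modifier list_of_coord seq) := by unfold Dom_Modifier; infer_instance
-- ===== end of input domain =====

-- B fuses A's two passes into a single forward scan carrying the current filled coordinate.

-- ===== PORT A =====
-- helper `modifier`: add 1 to non-None entries, then forward-fill Nones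
-- (leading Nones take the first non-None value).  `next(...)` raises
-- StopIteration when every entry is None — excluded by Pre_; the getD 0
-- default is never reached inside Pre_.
def pyModifier (coordinates : List (Option Int)) : List Int :=
  let coords := coordinates.map (fun el => el.map (· + 1))
  let start := ((coords.filterMap id).head?).getD 0
  (coords.foldl (fun (acc : List Int × Int) ele =>
      match ele with
      | none => (acc.1 ++ [acc.2], acc.2)
      | some v => (acc.1 ++ [v], v)) ([], start)).1

-- seq[i] raises IndexError when seq is too short — excluded by Pre_ (default ' ' unreachable there).
def Modifier (list_of_coord : List (Option Int)) (seq : String) : List Int × String :=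
  let c := pyModifier list_of_coord
  let cs := seq.toList
  let r := (List.range (c.length - 1)).foldl
    (fun (acc : List Int × List Char) i =>
      let a := c.getD i 0
      let b := c.getD (i + 1) 0
      if b - a > 1 then
        (acc.1 ++ a :: PySem.List.pyRange (a + 1) b 1,
         acc.2 ++ cs.getD i ' ' :: List.replicate (b - a - 1).toNat '-')
      else
        (acc.1 ++ [a], acc.2 ++ [cs.getD i ' '])) ([], [])
  (r.1, String.ofList r.2)

-- ===== PORT B =====
def Modifier_alt (list_of_coord : List (Option Int)) (seq : String) : List Int × String :=
  let start := ((list_of_coord.filterMap id).head?).getD (-1) + 1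
  let cs := seq.toList
  let r := (List.range (list_of_coord.length - 1)).foldl
    (fun (acc : List Int × List (List Char) × Int) i =>
      let prev := acc.2.2
      let nxt := match list_of_coord.getD (i + 1) none with
        | none => prev
        | some v => v + 1
      if nxt - prev > 1 then
        (acc.1 ++ prev :: PySem.List.pyRange (prev + 1) nxt 1,
         acc.2.1 ++ [cs.getD i ' ' :: List.replicate (nxt - prev - 1).toNat '-'], nxt)
      else
        (acc.1 ++ [prev], acc.2.1 ++ [[cs.getD i ' ']], nxt))
    ([], [], start)
  (r.1, String.ofList r.2.1.flatten)

-- ===== PRECONDITION & SPEC =====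
-- Pre_ excludes exactly the inputs where Python A raises: all-None (or empty)
-- coordinate lists (StopIteration) and seqs shorter than len(list)-1 (IndexError).
def Pre_Modifier (list_of_coord : List (Option Int)) (seq : String) : Prop :=
  (list_of_coord.any (fun o => o.isSome)) = true ∧
  list_of_coord.length - 1 ≤ seq.toList.length
instance (list_of_coord : List (Option Int)) (seq : String) : Decidable (Pre_Modifier list_of_coord seq) := by unfold Pre_Modifier; infer_instance

def pvWitness_Modifier : List (Option Int) × String := ([some 2, none, some 5], "ACG")

def Spec_Modifier (list_of_coord : List (Option Int)) (seq : String) (out : List Int × String) : Prop := out = Modifier_alt list_of_coord seq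
instance (list_of_coord : List (Option Int)) (seq : String) (out : List Int × String) : Decidable (Spec_Modifier list_of_coord seq out) := by unfold Spec_Modifier; infer_instance

-- ===== CLAIM (what is proved, stated in full; the proofs are below) =====
def Claim_equal_Modifier : Prop := ∀ (list_of_coord : List (Option Int)) (seq : String), Dom_Modifier list_of_coord seq → Pre_Modifier list_of_coord seq → Spec_Modifier list_of_coord seq (Modifier list_of_coord seq)

-- ===== LEMMAS AND PROOFS =====

-- true start coordinate: first non-None entry + 1
def pvStart (xs : List (Option Int)) : Int := ((xs.filterMap id).head?).getD (-1) + 1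

-- recursive forward-fill over the raw list (coordinates + 1, carry p)
def pvFill (p : Int) : List (Option Int) → List Int
  | [] => []
  | none :: t => p :: pvFill p t
  | some v :: t => (v + 1) :: pvFill (v + 1) t

-- forward-fill over the already (+1)-mapped list, as pyModifier's loop computes it
def gfill (s : Int) : List (Option Int) → List Int
  | [] => []
  | none :: t => s :: gfill s t
  | some v :: t => v :: gfill v t

-- one fused emission step per consecutive pair, recursively
def pvEmit (prev : Int) : List (Option Int) → List Char → List Int × List (List Char) × Int
  | [], _ => ([], [], prev)
  | none :: t, cs =>
      let r := pvEmit prev t cs.tail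
      (prev :: r.1, [cs.getD 0 ' '] :: r.2.1, r.2.2)
  | some v :: t, cs =>
      let nxt := v + 1
      let r := pvEmit nxt t cs.tail
      if nxt - prev > 1 then
        (prev :: (PySem.List.pyRange (prev + 1) nxt 1 ++ r.1),
         (cs.getD 0 ' ' :: List.replicate (nxt - prev - 1).toNat '-') :: r.2.1, r.2.2)
      else
        (prev :: r.1, [cs.getD 0 ' '] :: r.2.1, r.2.2)

-- the loop bodies of the two ports, named
def astep (c : List Int) (cs : List Char) (acc : List Int × List Char) (i : Nat) :
    List Int × List Char :=
  let a := c.getD i 0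
  let b := c.getD (i + 1) 0
  if b - a > 1 then
    (acc.1 ++ a :: PySem.List.pyRange (a + 1) b 1,
     acc.2 ++ cs.getD i ' ' :: List.replicate (b - a - 1).toNat '-')
  else
    (acc.1 ++ [a], acc.2 ++ [cs.getD i ' '])

def bstep (ts : List (Option Int)) (cs : List Char)
    (acc : List Int × List (List Char) × Int) (i : Nat) : List Int × List (List Char) × Int :=
  let prev := acc.2.2
  let nxt := match ts.getD i none with
    | none => prev
    | some v => v + 1
  if nxt - prev > 1 then
    (acc.1 ++ prev :: PySem.List.pyRange (prev + 1) nxt 1,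
     acc.2.1 ++ [cs.getD i ' ' :: List.replicate (nxt - prev - 1).toNat '-'], nxt)
  else
    (acc.1 ++ [prev], acc.2.1 ++ [[cs.getD i ' ']], nxt)

-- B's loop body exactly as the port writes it (list read at i+1, chars at i)
def bstepP (xs : List (Option Int)) (cs : List Char)
    (acc : List Int × List (List Char) × Int) (i : Nat) : List Int × List (List Char) × Int :=
  let prev := acc.2.2
  let nxt := match xs.getD (i + 1) none with
    | none => prev
    | some v => v + 1
  if nxt - prev > 1 then
    (acc.1 ++ prev :: PySem.List.pyRange (prev + 1) nxt 1,
     acc.2.1 ++ [cs.getD i ' ' :: List.replicate (nxt - prev - 1).toNat '-'], nxt)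
  else
    (acc.1 ++ [prev], acc.2.1 ++ [[cs.getD i ' ']], nxt)

theorem pvFill_none (p : Int) (t : List (Option Int)) :
    pvFill p (none :: t) = p :: pvFill p t := by simp [pvFill]

theorem pvFill_some (p v : Int) (t : List (Option Int)) :
    pvFill p (some v :: t) = (v + 1) :: pvFill (v + 1) t := by simp [pvFill]

theorem pvFill_length (t : List (Option Int)) : ∀ p, (pvFill p t).length = t.length := by
  induction t with
  | nil => intro p; simp [pvFill]
  | cons e t ih => intro p; cases e <;> simp [pvFill, ih]

theorem gfold (ys : List (Option Int)) : ∀ (acc : List Int) (s : Int),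
    (ys.foldl (fun (acc : List Int × Int) ele =>
      match ele with
      | none => (acc.1 ++ [acc.2], acc.2)
      | some v => (acc.1 ++ [v], v)) (acc, s)).1 = acc ++ gfill s ys := by
  induction ys with
  | nil => intro acc s; simp [gfill]
  | cons e t ih => intro acc s; cases e <;> simp [gfill, ih]

theorem gfill_map (xs : List (Option Int)) : ∀ s,
    gfill s (xs.map (fun el => el.map (· + 1))) = pvFill s xs := by
  induction xs with
  | nil => intro s; simp [gfill, pvFill]
  | cons e t ih => intro s; cases e <;> simp [gfill, pvFill, ih]

theorem start_eq (xs : List (Option Int)) :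
    (((xs.map (fun el => el.map (· + 1))).filterMap id).head?).getD 0 = pvStart xs := by
  induction xs with
  | nil => simp [pvStart]
  | cons e t ih => cases e with
    | none => simpa [pvStart] using ih
    | some v => simp [pvStart]

theorem pyModifier_eq (xs : List (Option Int)) :
    pyModifier xs = pvFill (pvStart xs) xs := by
  unfold pyModifier
  rw [gfold, start_eq, gfill_map]
  simp

-- the first filled value is the start itself
theorem fill_head (e : Option Int) (t : List (Option Int)) :
    pvFill (pvStart (e :: t)) (e :: t) = pvStart (e :: t) :: pvFill (pvStart (e :: t)) t := by
  cases e <;> simp [pvFill, pvStart]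

theorem foldl_range_shift {α : Type} (f : α → Nat → α) (n : Nat) (init : α) :
    (List.range (n + 1)).foldl f init = (List.range n).foldl (fun a i => f a (i + 1)) (f init 0) := by
  rw [List.range_succ_eq_map, List.foldl_cons, List.foldl_map]

theorem astep_shift (x : Int) (c : List Int) (cs : List Char) (acc : List Int × List Char) (i : Nat) :
    astep (x :: c) cs acc (i + 1) = astep c cs.tail acc i := by
  simp [astep]

theorem bstep_shift (e : Option Int) (ts : List (Option Int)) (cs : List Char)
    (acc : List Int × List (List Char) × Int) (i : Nat) :
    bstep (e :: ts) cs acc (i + 1) = bstep ts cs.tail acc i := by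
  simp [bstep]

theorem bstepP_cons (e : Option Int) (ts : List (Option Int)) (cs : List Char) :
    bstepP (e :: ts) cs = bstep ts cs := by
  funext acc i
  simp [bstepP, bstep]

-- A's pair loop over the filled list computes pvEmit
theorem amain (t : List (Option Int)) : ∀ (p : Int) (cs : List Char) (A : List Int) (P : List Char),
    (List.range t.length).foldl (astep (p :: pvFill p t) cs) (A, P)
    = (A ++ (pvEmit p t cs).1, P ++ (pvEmit p t cs).2.1.flatten) := by
  induction t with
  | nil => intro p cs A P; simp [pvEmit]
  | cons e t ih =>
    intro p cs A P
    rw [List.length_cons, foldl_range_shift]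
    cases e with
    | none =>
      rw [pvFill_none]
      simp only [astep_shift]
      have h0 : astep (p :: p :: pvFill p t) cs (A, P) 0 = (A ++ [p], P ++ [cs.getD 0 ' ']) := by
        simp [astep]
      rw [h0, ih]
      simp [pvEmit, List.append_assoc]
    | some v =>
      rw [pvFill_some]
      simp only [astep_shift]
      by_cases h : v + 1 - p > 1
      · have h0 : astep (p :: (v + 1) :: pvFill (v + 1) t) cs (A, P) 0
            = (A ++ p :: PySem.List.pyRange (p + 1) (v + 1) 1,
               P ++ cs.getD 0 ' ' :: List.replicate (v + 1 - p - 1).toNat '-') := by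
          simp [astep, h]
        rw [h0, ih]
        simp [pvEmit, h, List.append_assoc]
      · have h0 : astep (p :: (v + 1) :: pvFill (v + 1) t) cs (A, P) 0
            = (A ++ [p], P ++ [cs.getD 0 ' ']) := by
          simp [astep, h]
        rw [h0, ih]
        simp [pvEmit, h, List.append_assoc]

-- B's fused loop computes pvEmit
theorem bmain (t : List (Option Int)) :
    ∀ (cs : List Char) (prev : Int) (A : List Int) (P : List (List Char)),
    (List.range t.length).foldl (bstep t cs) (A, P, prev)
    = (A ++ (pvEmit prev t cs).1, P ++ (pvEmit prev t cs).2.1, (pvEmit prev t cs).2.2) := by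
  induction t with
  | nil => intro cs prev A P; simp [pvEmit]
  | cons e t ih =>
    intro cs prev A P
    rw [List.length_cons, foldl_range_shift]
    simp only [bstep_shift]
    cases e with
    | none =>
      have h0 : bstep (none :: t) cs (A, P, prev) 0 = (A ++ [prev], P ++ [[cs.getD 0 ' ']], prev) := by
        simp [bstep]
      rw [h0, ih]
      simp [pvEmit, List.append_assoc]
    | some v =>
      by_cases h : v + 1 - prev > 1
      · have h0 : bstep (some v :: t) cs (A, P, prev) 0
            = (A ++ prev :: PySem.List.pyRange (prev + 1) (v + 1) 1,
               P ++ [cs.getD 0 ' ' :: List.replicate (v + 1 - prev - 1).toNat '-'], v + 1) := by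
          simp [bstep, h]
        rw [h0, ih]
        simp [pvEmit, h, List.append_assoc]
      · have h0 : bstep (some v :: t) cs (A, P, prev) 0
            = (A ++ [prev], P ++ [[cs.getD 0 ' ']], v + 1) := by
          simp [bstep, h]
        rw [h0, ih]
        simp [pvEmit, h, List.append_assoc]

theorem main_eq (xs : List (Option Int)) (seq : String) :
    Modifier xs seq = Modifier_alt xs seq := by
  cases xs with
  | nil => rfl
  | cons e t =>
    unfold Modifier Modifier_alt
    have ha : (fun (acc : List Int × List Char) i =>
        let a := (pyModifier (e :: t)).getD i 0
        let b := (pyModifier (e :: t)).getD (i + 1) 0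
        if b - a > 1 then
          (acc.1 ++ a :: PySem.List.pyRange (a + 1) b 1,
           acc.2 ++ seq.toList.getD i ' ' :: List.replicate (b - a - 1).toNat '-')
        else
          (acc.1 ++ [a], acc.2 ++ [seq.toList.getD i ' ']))
        = astep (pyModifier (e :: t)) seq.toList := rfl
    have hb : (fun (acc : List Int × List (List Char) × Int) i =>
        let prev := acc.2.2
        let nxt := match (e :: t).getD (i + 1) none with
          | none => prev
          | some v => v + 1
        if nxt - prev > 1 then
          (acc.1 ++ prev :: PySem.List.pyRange (prev + 1) nxt 1,
           acc.2.1 ++ [seq.toList.getD i ' ' :: List.replicate (nxt - prev - 1).toNat '-'], nxt)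
        else
          (acc.1 ++ [prev], acc.2.1 ++ [[seq.toList.getD i ' ']], nxt))
        = bstepP (e :: t) seq.toList := rfl
    simp only [ha, hb, bstepP_cons]
    rw [pyModifier_eq, fill_head]
    have hlen : (pvStart (e :: t) :: pvFill (pvStart (e :: t)) t).length - 1 = t.length := by
      simp [pvFill_length]
    have hlen2 : (e :: t).length - 1 = t.length := by simp
    rw [hlen, hlen2, amain, bmain]
    have hs : pvStart (e :: t) = (List.findSome? (fun x => x) (e :: t)).getD (-1) + 1 := by
      simp [pvStart]
    simp [hs]

theorem Modifier_spec : Claim_equal_Modifier := by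
  intro xs seq _ _
  exact main_eq xs seq
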